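-- pv_equiv track=rewrite | github.com/pataugustine33-coder/Sailplan | sailbuild/compute.py | sea_position_label
-- ===== SOURCE A (Python) =====
-- def _to_int_deg(value) -> int:
--     """Coerce a bearing value to int. YAML strings like '080' (leading zero)
--     parse as strings, so we accept either type."""
--     if value is None:
--         return 0
--     if isinstance(value, int):
--         return value
--     return int(str(value).strip())
--
-- def sea_position_label(course_deg: int, sea_from_deg: int) -> str:
--     """Position abbreviation describing how the boat feels the sea.
--
--     Returns one of: HD, PB, PQ, ST, SQ, SB.
--
--     The signed relative bearing tells which side:
--       diff = sea_from - course, normalized to -180..+180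
--       negative = port, positive = starboard
--     """
--     course_deg = _to_int_deg(course_deg)
--     sea_from_deg = _to_int_deg(sea_from_deg)
--     diff = sea_from_deg - course_deg
--     while diff > 180:
--         diff -= 360
--     while diff < -180:
--         diff += 360
--     abs_a = abs(diff)
--     if abs_a <= 30:
--         return "HD"
--     if abs_a >= 150:
--         return "ST"
--     is_port = diff < 0
--     if is_port:
--         return "PB" if abs_a <= 90 else "PQ"
--     return "SB" if abs_a <= 90 else "SQ"
-- ===== SOURCE B (Python) =====
-- def _to_int_deg(value) -> int:
--     """Coerce a bearing value to int. YAML strings like '080' (leading zero)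
--     parse as strings, so we accept either type."""
--     if value is None:
--         return 0
--     if isinstance(value, int):
--         return value
--     return int(str(value).strip())
--
-- def sea_position_label(course_deg: int, sea_from_deg: int) -> str:
--     # closed-form wrap to [-180, 180) instead of the two while loops
--     diff = (_to_int_deg(sea_from_deg) - _to_int_deg(course_deg) + 180) % 360 - 180
--     a = abs(diff)
--     if a <= 30:
--         return "HD"
--     if a >= 150:
--         return "ST"
--     side = "P" if diff < 0 else "S"
--     sector = "B" if a <= 90 else "Q"
--     return side + sector
-- ===== Notes on version B (the rewrite author's own statement) =====
-- stated objective: idiomatic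
-- what changed: The two while-loop normalizations are replaced by the closed-form wrap (diff+180) % 360 - 180 (constant-time, no loops), and the four-way side branch is replaced by composing a side letter with a sector letter.
import Mathlib
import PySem

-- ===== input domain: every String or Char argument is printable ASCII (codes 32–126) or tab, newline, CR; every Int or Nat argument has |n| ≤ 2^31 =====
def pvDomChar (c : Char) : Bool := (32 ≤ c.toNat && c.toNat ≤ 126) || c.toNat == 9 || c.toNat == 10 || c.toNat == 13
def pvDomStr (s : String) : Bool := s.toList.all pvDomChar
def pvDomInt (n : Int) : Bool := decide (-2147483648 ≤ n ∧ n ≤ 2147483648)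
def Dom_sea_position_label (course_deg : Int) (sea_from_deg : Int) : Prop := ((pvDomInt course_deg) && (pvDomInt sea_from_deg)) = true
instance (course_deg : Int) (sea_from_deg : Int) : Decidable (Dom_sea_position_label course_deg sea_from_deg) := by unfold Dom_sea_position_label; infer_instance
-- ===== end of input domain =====

-- B replaces A's two while-loop normalizations by the closed-form wrap (diff+180) % 360 - 180
-- and composes the side/sector letters; equivalence of the return values is proved below.

-- ===== PORT A =====
-- the `while diff > 180: diff -= 360` loop
def pvNormHi (d : Int) : Int :=
  if d > 180 then pvNormHi (d - 360) else d
  termination_by (d - 180).toNat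
  decreasing_by omega

-- the `while diff < -180: diff += 360` loop
def pvNormLo (d : Int) : Int :=
  if d < -180 then pvNormLo (d + 360) else d
  termination_by (-180 - d).toNat
  decreasing_by omega

def sea_position_label (course_deg : Int) (sea_from_deg : Int) : String :=
  -- _to_int_deg is the identity on int inputs
  let diff := pvNormLo (pvNormHi (sea_from_deg - course_deg))
  let abs_a := |diff|
  if abs_a ≤ 30 then "HD"
  else if abs_a ≥ 150 then "ST"
  else if diff < 0 then (if abs_a ≤ 90 then "PB" else "PQ")
  else (if abs_a ≤ 90 then "SB" else "SQ")

-- ===== PORT B =====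
def sea_position_label_alt (course_deg : Int) (sea_from_deg : Int) : String :=
  let diff := PySem.Int.mod (sea_from_deg - course_deg + 180) 360 - 180
  let a := |diff|
  if a ≤ 30 then "HD"
  else if a ≥ 150 then "ST"
  else
    let side := if diff < 0 then "P" else "S"
    let sector := if a ≤ 90 then "B" else "Q"
    side ++ sector

-- ===== PRECONDITION & SPEC =====
def Spec_sea_position_label (course_deg : Int) (sea_from_deg : Int) (out : String) : Prop := out = sea_position_label_alt course_deg sea_from_deg
instance (course_deg : Int) (sea_from_deg : Int) (out : String) : Decidable (Spec_sea_position_label course_deg sea_from_deg out) := by unfold Spec_sea_position_label; infer_instance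

-- ===== CLAIM (what is proved, stated in full; the proofs are below) =====
def Claim_equal_sea_position_label : Prop := ∀ (course_deg : Int) (sea_from_deg : Int), Dom_sea_position_label course_deg sea_from_deg → Spec_sea_position_label course_deg sea_from_deg (sea_position_label course_deg sea_from_deg)

-- ===== LEMMAS AND PROOFS =====

theorem pvNormHi_le (d : Int) : pvNormHi d ≤ 180 := by
  unfold pvNormHi
  split
  · exact pvNormHi_le (d - 360)
  · omega
  termination_by (d - 180).toNat
  decreasing_by omega

theorem pvNormHi_mod (d : Int) : pvNormHi d % 360 = d % 360 := by
  unfold pvNormHi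
  split
  · rw [pvNormHi_mod (d - 360)]; omega
  · rfl
  termination_by (d - 180).toNat
  decreasing_by omega

theorem pvNormHi_ge (d : Int) (h : -180 ≤ d) : -180 ≤ pvNormHi d := by
  unfold pvNormHi
  split
  · exact pvNormHi_ge (d - 360) (by omega)
  · omega
  termination_by (d - 180).toNat
  decreasing_by omega

theorem pvNormLo_ge (d : Int) : -180 ≤ pvNormLo d := by
  unfold pvNormLo
  split
  · exact pvNormLo_ge (d + 360)
  · omega
  termination_by (-180 - d).toNat
  decreasing_by omega

theorem pvNormLo_le (d : Int) (h : d ≤ 180) : pvNormLo d ≤ 180 := by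
  unfold pvNormLo
  split
  · exact pvNormLo_le (d + 360) (by omega)
  · omega
  termination_by (-180 - d).toNat
  decreasing_by omega

theorem pvNormLo_mod (d : Int) : pvNormLo d % 360 = d % 360 := by
  unfold pvNormLo
  split
  · rw [pvNormLo_mod (d + 360)]; omega
  · rfl
  termination_by (-180 - d).toNat
  decreasing_by omega

-- A's normalized diff and B's closed-form diff are either equal, or are the pair (180, -180)
theorem pvNorm_cases (d : Int) :
    pvNormLo (pvNormHi d) = PySem.Int.mod (d + 180) 360 - 180 ∨
    (pvNormLo (pvNormHi d) = 180 ∧ PySem.Int.mod (d + 180) 360 - 180 = -180) := by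
  have hmod : PySem.Int.mod (d + 180) 360 = (d + 180) % 360 :=
    PySem.Int.mod_eq_emod_of_pos (by norm_num)
  set r := pvNormLo (pvNormHi d) with hr
  have h1 : -180 ≤ r := pvNormLo_ge _
  have h2 : r ≤ 180 := pvNormLo_le _ (pvNormHi_le d)
  have h3 : r % 360 = d % 360 := by rw [hr, pvNormLo_mod, pvNormHi_mod]
  have hb1 : 0 ≤ (d + 180) % 360 := Int.emod_nonneg _ (by norm_num)
  have hb2 : (d + 180) % 360 < 360 := Int.emod_lt_of_pos _ (by norm_num)
  have h4 : (d + 180) % 360 = (r + 180) % 360 := by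
    conv_lhs => rw [Int.add_emod, ← h3, ← Int.add_emod]
  have h5 : (r + 180) % 360 = (r + 180) - 360 * ((r + 180) / 360) := by
    rw [Int.emod_def]
  have hq : (r + 180) / 360 = 0 ∨ (r + 180) / 360 = 1 := by
    rcases lt_or_ge (r + 180) 360 with h | h
    · left; exact Int.ediv_eq_zero_of_lt (by omega) h
    · right
      have : r + 180 = 360 := by omega
      rw [this]; norm_num
  rw [hmod]
  rcases hq with hq | hq <;> rw [hq] at h5 <;> [left; right] <;> omega

-- ===== VERDICT (by name: the statement is the Claim_ definition above) =====
theorem sea_position_label_spec : Claim_equal_sea_position_label := by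
  intro course_deg sea_from_deg _
  unfold Spec_sea_position_label sea_position_label sea_position_label_alt
  rcases pvNorm_cases (sea_from_deg - course_deg) with h | ⟨h1, h2⟩
  · simp only [h]
    set rb := PySem.Int.mod (sea_from_deg - course_deg + 180) 360 - 180 with hrb
    by_cases c1 : |rb| ≤ 30
    · simp [c1]
    · by_cases c2 : |rb| ≥ 150
      · simp [c1, c2]
      · by_cases c3 : rb < 0
        · by_cases c4 : |rb| ≤ 90 <;> simp [c1, c2, c3, c4]
        · by_cases c4 : |rb| ≤ 90 <;> simp [c1, c2, c3, c4]
  · rw [h1, h2]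
    norm_num
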